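-- pv_equiv track=rewrite | github.com/jorisroovers/project_euler | problem5/solution.py | range_dividers
-- ===== SOURCE A (Python) =====
-- def range_dividers(range_end):
--     result = []
--     for i in range(range_end, 2, -1):
--         all_good = True
--         for j in result:
--             if j % i == 0:
--                 all_good = False
--         if all_good:
--             result.append(i)
--     return result
-- ===== SOURCE B (Python) =====
-- def range_dividers(range_end):
--     # Closed form: exactly the integers in (range_end//2, range_end] that exceed 2,
--     # listed in descending order (numbers <= range_end//2 always have a selected multiple).
--     return list(range(range_end, max(range_end // 2, 2), -1))
-- ===== Notes on version B (the rewrite author's own statement) =====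
-- stated objective: faster
-- what changed: Replaces the quadratic select-and-rescan loop by the closed form: the selected numbers are exactly the integers in (range_end//2, range_end] above 2, so B just emits that descending range.
import Mathlib
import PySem

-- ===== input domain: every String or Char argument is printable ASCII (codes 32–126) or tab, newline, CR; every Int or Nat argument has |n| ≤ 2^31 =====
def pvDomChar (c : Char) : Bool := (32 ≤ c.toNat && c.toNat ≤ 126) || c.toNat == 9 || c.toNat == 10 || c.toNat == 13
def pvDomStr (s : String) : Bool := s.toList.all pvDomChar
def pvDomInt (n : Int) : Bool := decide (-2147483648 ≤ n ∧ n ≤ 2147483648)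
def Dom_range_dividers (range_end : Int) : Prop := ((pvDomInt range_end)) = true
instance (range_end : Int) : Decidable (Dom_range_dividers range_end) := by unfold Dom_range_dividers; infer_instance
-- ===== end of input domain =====

-- B replaces A's quadratic select-and-rescan loop by the proved closed form (the descending range (range_end//2, range_end] above 2); faster.

-- ===== PORT A =====
def range_dividers (range_end : Int) : List Int :=
  (PySem.List.pyRange range_end 2 (-1)).foldl
    (fun result i =>
      let all_good := result.foldl (fun g j => if PySem.Int.mod j i == 0 then false else g) true
      if all_good then result ++ [i] else result)
    []

-- ===== PORT B =====
def range_dividers_alt (range_end : Int) : List Int :=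
  PySem.List.pyRange range_end (max (PySem.Int.floordiv range_end 2) 2) (-1)

-- ===== PRECONDITION & SPEC =====
def Spec_range_dividers (range_end : Int) (out : List Int) : Prop := out = range_dividers_alt range_end
instance (range_end : Int) (out : List Int) : Decidable (Spec_range_dividers range_end out) := by unfold Spec_range_dividers; infer_instance

-- ===== CLAIM (what is proved, stated in full; the proofs are below) =====
def Claim_equal_range_dividers : Prop := ∀ (range_end : Int), Dom_range_dividers range_end → Spec_range_dividers range_end (range_dividers range_end)

-- ===== LEMMAS AND PROOFS =====

-- append-at-the-low-end form of a countdown range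
theorem pyRange_neg_one_snoc (a b : Int) (h : b < a) :
    PySem.List.pyRange a b (-1) = PySem.List.pyRange a (b + 1) (-1) ++ [b + 1] := by
  rw [PySem.List.pyRange_neg_one_eq_reverse, PySem.List.pyRange_one_cons (by omega),
    List.reverse_cons, ← PySem.List.pyRange_neg_one_eq_reverse]

-- A's inner loop computes "no element of l is divisible by i"
theorem inner_all (i : Int) (l : List Int) (g : Bool) :
    l.foldl (fun g j => if PySem.Int.mod j i == 0 then false else g) g
      = (g && l.all (fun j => !(PySem.Int.mod j i == 0))) := by
  induction l generalizing g with
  | nil => simp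
  | cons x xs ih =>
    simp only [List.foldl_cons, List.all_cons, ih]
    by_cases h : PySem.Int.mod x i == 0 <;> simp [h]

-- the step function of A's outer loop
theorem key (n : Int) (k : Nat) : ∀ t : Int, 2 ≤ t → n - t ≤ (k : Int) →
    (PySem.List.pyRange n t (-1)).foldl
      (fun result i =>
        let all_good := result.foldl (fun g j => if PySem.Int.mod j i == 0 then false else g) true
        if all_good then result ++ [i] else result)
      []
    = PySem.List.pyRange n (max (n / 2) t) (-1) := by
  induction k with
  | zero =>
    intro t ht hk
    rw [PySem.List.pyRange_neg_one_eq_nil (by omega),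
      PySem.List.pyRange_neg_one_eq_nil (by omega)]
    simp
  | succ k ih =>
    intro t ht hk
    by_cases hn : n ≤ t
    · rw [PySem.List.pyRange_neg_one_eq_nil (by omega),
        PySem.List.pyRange_neg_one_eq_nil (by omega)]
      simp
    · rw [Int.not_le] at hn
      rw [pyRange_neg_one_snoc n t hn, List.foldl_append, ih (t + 1) (by omega) (by omega)]
      simp only [List.foldl_cons, List.foldl_nil]
      set i := t + 1 with hi
      have hi3 : 3 ≤ i := by omega
      have hin : i ≤ n := by omega
      by_cases hbig : 2 * i > n
      · -- i is selected: no element of the current result is a multiple of i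
        have hmax : max (n / 2) i = i := by omega
        have hall : (PySem.List.pyRange n (max (n / 2) i) (-1)).all
            (fun j => !(PySem.Int.mod j i == 0)) = true := by
          rw [List.all_eq_true]
          intro j hj
          rw [PySem.List.mem_pyRange_neg_one] at hj
          rw [hmax] at hj
          simp only [Bool.not_eq_eq_eq_not, Bool.not_true, beq_eq_false_iff_ne, ne_eq]
          intro hmod
          rw [PySem.Int.mod_eq_zero_iff_dvd] at hmod
          obtain ⟨c, hc⟩ := hmod
          have hc2 : 2 ≤ c := by nlinarith [hj.1, hj.2, hmax]
          nlinarith [hj.2]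
        rw [inner_all]
        simp only [Bool.true_and, hall, if_pos]
        have hsn := pyRange_neg_one_snoc n (i - 1) (by omega)
        have h1 : i - 1 + 1 = i := by ring
        rw [h1] at hsn
        rw [hmax, ← hsn]
        have : max (n / 2) t = i - 1 := by omega
        rw [this]
      · -- i is not selected: i * (n / i) is in the current result and divisible by i
        rw [Int.not_lt] at hbig
        have hmax : max (n / 2) i = n / 2 := by omega
        have hmod1 : 0 ≤ n % i := Int.emod_nonneg n (by omega)
        have hmod2 : n % i < i := Int.emod_lt_of_pos n (by omega)
        have hdef : n % i = n - i * (n / i) := Int.emod_def n i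
        have hjmem : i * (n / i) ∈ PySem.List.pyRange n (max (n / 2) i) (-1) := by
          rw [PySem.List.mem_pyRange_neg_one, hmax]
          omega
        have hex : (PySem.List.pyRange n (max (n / 2) i) (-1)).all
            (fun j => !(PySem.Int.mod j i == 0)) = false := by
          rw [List.all_eq_false]
          refine ⟨i * (n / i), hjmem, ?_⟩
          have : PySem.Int.mod (i * (n / i)) i = 0 := by
            rw [PySem.Int.mod_eq_emod_of_pos (by omega)]
            exact Int.mul_emod_right i (n / i)
          simp [this]
        rw [inner_all]
        simp only [Bool.true_and, hex, if_neg, Bool.false_eq_true, not_false_eq_true]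
        rw [hmax]
        have : max (n / 2) t = n / 2 := by omega
        rw [this]

-- ===== VERDICT (by name: the statement is the Claim_ definition above) =====
theorem range_dividers_spec : Claim_equal_range_dividers := by
  intro n _
  unfold Spec_range_dividers range_dividers range_dividers_alt
  rw [PySem.Int.floordiv_eq_ediv_of_pos (by omega)]
  exact key n (n - 2).toNat 2 (by omega) (by omega)
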